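-- pv_equiv track=rewrite | github.com/Kingkrusha/Spellbook | spell_slots.py | get_eldritch_knight_cantrips
-- ===== SOURCE A (Python) =====
-- ELDRITCH_KNIGHT_CANTRIPS = {
--     3: 2, 10: 3  # 2 cantrips at level 3, 3 at level 10
-- }
--
-- def get_eldritch_knight_cantrips(fighter_level: int) -> int:
--     """Get number of cantrips for Eldritch Knight at a given Fighter level."""
--     if fighter_level < 3:
--         return 0
--     cantrips = 0
--     for threshold_level, num_cantrips in sorted(ELDRITCH_KNIGHT_CANTRIPS.items()):
--         if fighter_level >= threshold_level:
--             cantrips = num_cantrips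
--     return cantrips
-- ===== SOURCE B (Python) =====
-- def get_eldritch_knight_cantrips(fighter_level: int) -> int:
--     """Get number of cantrips for Eldritch Knight at a given Fighter level."""
--     if fighter_level >= 10:
--         return 3
--     if fighter_level >= 3:
--         return 2
--     return 0
-- ===== Notes on version B (the rewrite author's own statement) =====
-- stated objective: simpler
-- what changed: Replaces the dict-sort-and-scan loop with a flat descending conditional chain over the two thresholds.
import Mathlib
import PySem

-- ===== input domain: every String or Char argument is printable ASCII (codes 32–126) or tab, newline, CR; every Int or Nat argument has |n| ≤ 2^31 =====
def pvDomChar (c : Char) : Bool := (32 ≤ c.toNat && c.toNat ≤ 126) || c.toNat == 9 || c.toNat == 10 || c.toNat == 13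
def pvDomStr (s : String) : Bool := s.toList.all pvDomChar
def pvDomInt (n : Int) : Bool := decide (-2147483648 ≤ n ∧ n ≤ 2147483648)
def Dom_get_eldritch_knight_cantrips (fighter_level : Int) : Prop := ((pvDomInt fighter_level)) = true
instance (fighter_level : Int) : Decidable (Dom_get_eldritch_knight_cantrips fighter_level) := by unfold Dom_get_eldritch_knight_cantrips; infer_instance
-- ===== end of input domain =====

-- B replaces A's sorted-dict scan with a flat descending conditional chain (simpler).


-- ===== PORT A =====
def ELDRITCH_KNIGHT_CANTRIPS : PySem.Dict Int Int := PySem.Dict.ofList [(3, 2), (10, 3)]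

def get_eldritch_knight_cantrips (fighter_level : Int) : Int :=
  if fighter_level < 3 then 0
  else
    (PySem.List.sorted2 (ELDRITCH_KNIGHT_CANTRIPS.items) Prod.fst Prod.snd).foldl
      (fun cantrips p =>
        if fighter_level ≥ p.1 then p.2 else cantrips) 0

-- ===== PORT B =====
def get_eldritch_knight_cantrips_alt (fighter_level : Int) : Int :=
  if fighter_level ≥ 10 then 3
  else if fighter_level ≥ 3 then 2
  else 0

-- ===== PRECONDITION & SPEC =====
def Spec_get_eldritch_knight_cantrips (fighter_level : Int) (out : Int) : Prop := out = get_eldritch_knight_cantrips_alt fighter_level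
instance (fighter_level : Int) (out : Int) : Decidable (Spec_get_eldritch_knight_cantrips fighter_level out) := by unfold Spec_get_eldritch_knight_cantrips; infer_instance

-- ===== CLAIM (what is proved, stated in full; the proofs are below) =====
def Claim_equal_get_eldritch_knight_cantrips : Prop := ∀ (fighter_level : Int), Dom_get_eldritch_knight_cantrips fighter_level → Spec_get_eldritch_knight_cantrips fighter_level (get_eldritch_knight_cantrips fighter_level)

-- ===== LEMMAS AND PROOFS =====

-- ===== VERDICT (by name: the statement is the Claim_ definition above) =====
theorem get_eldritch_knight_cantrips_spec : Claim_equal_get_eldritch_knight_cantrips := by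
  intro n _
  unfold Spec_get_eldritch_knight_cantrips get_eldritch_knight_cantrips get_eldritch_knight_cantrips_alt
  rw [show PySem.List.sorted2 (ELDRITCH_KNIGHT_CANTRIPS.items) Prod.fst Prod.snd = [(3,2),(10,3)] from by decide]
  simp only [List.foldl]
  split_ifs <;> omega
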